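-- pv_equiv track=rewrite | github.com/sachinagada/CS-112---Fundamentals-of-Programming-and-Computer-Science | HW 2/HW 2 practice.py | isPowerfulNumber
-- ===== SOURCE A (Python) =====
-- import math
--
-- def isPrime(n):   # code from class. Url: http://www.cs.cmu.edu/~112/notes/notes-loops.html#isPrime
--     if (n < 2):
--         return False
--     elif (n ==2):
--         return True
--     elif (n%2 ==0):
--         return False
--     maxfactor = round(math.sqrt(n))
--     for term in range(2,maxfactor+1):
--         if n%term==0:
--             return False
--     return True
--
-- def nthPrime(n):  # from class notes, same URL as is prime
--     found = 0
--     guess = 0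
--     while (found <= n):
--         guess += 1
--         if (isPrime(guess)):
--             found += 1
--     return guess
--
-- def pi(n):  #counting Prime numbers
--     found = 0
--     for term in range (2, n+1):
--         if (isPrime(term)):
--             found +=1
--     return found
--
-- def isPowerfulNumber(n):
--     numberofprimes = pi(n)
--     for i in range(numberofprimes):
--         primenumber = nthPrime(i)
--         if (n%primenumber==0):
--             if (n%(primenumber**2)!=0):
--                 return False
--             else:
--                 continue
--     return True
-- ===== SOURCE B (Python) =====
-- def isPowerfulNumber(n):
--     # Trial-division factorization up to sqrt(n): every prime factor must occur with exponent >= 2.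
--     if n < 2:
--         return True
--     m = n
--     d = 2
--     while d * d <= m:
--         if m % d == 0:
--             cnt = 0
--             while m % d == 0:
--                 m //= d
--                 cnt += 1
--             if cnt < 2:
--                 return False
--         d += 1
--     return m == 1
-- ===== Notes on version B (the rewrite author's own statement) =====
-- stated objective: faster
-- what changed: A enumerates all primes up to n (computing pi(n) by primality-testing every integer, then re-deriving each prime from scratch with nthPrime) and tests each for squared divisibility; B does one trial-division factorization up to sqrt(n) and requires every prime factor's exponent to be at least 2.
import Mathlib
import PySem

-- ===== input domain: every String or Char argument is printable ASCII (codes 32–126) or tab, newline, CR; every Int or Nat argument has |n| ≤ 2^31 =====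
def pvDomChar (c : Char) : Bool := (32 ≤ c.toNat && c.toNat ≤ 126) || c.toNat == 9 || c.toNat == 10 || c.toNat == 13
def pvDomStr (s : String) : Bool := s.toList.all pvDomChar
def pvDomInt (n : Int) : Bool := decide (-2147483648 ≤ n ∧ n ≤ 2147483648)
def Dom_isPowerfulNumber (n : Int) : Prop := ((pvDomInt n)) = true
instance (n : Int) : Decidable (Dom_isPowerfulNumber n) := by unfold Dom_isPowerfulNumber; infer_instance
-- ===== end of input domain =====

-- B replaces A's prime-by-prime scan (pi(n) computed by primality-testing every number up to n,
-- each prime re-found from scratch by nthPrime) with a single trial-division factorization up to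
-- sqrt(n) requiring every prime factor's exponent to be >= 2.

-- ===== PORT A =====

-- round(math.sqrt n): exact as an integer function for 0 <= n <= 2^31 (the double sqrt is
-- correctly rounded there and a round-half tie is impossible for an integer radicand)
def pyRoundSqrt (n : Int) : Int :=
  if Int.sqrt n * Int.sqrt n + Int.sqrt n < n then Int.sqrt n + 1 else Int.sqrt n

def isPrime (n : Int) : Bool :=
  if n < 2 then false
  else if n == 2 then true
  else if PySem.Int.mod n 2 == 0 then false
  else
    let maxfactor := pyRoundSqrt n
    (PySem.List.pyRange 2 (maxfactor + 1) 1).all (fun term => !(PySem.Int.mod n term == 0))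

-- the 'while found <= n' loop of nthPrime with a fuel cap; fuel 2^31+2 suffices for every call
-- A makes on the domain (the prime searched for is <= n <= 2^31, see nthPrimeLoop_eq below)
def nthPrimeLoop : Nat → Int → Int → Int → Int
  | 0, _, _, guess => guess
  | fuel + 1, n, found, guess =>
      if found ≤ n then
        let guess' := guess + 1
        if isPrime guess' then nthPrimeLoop fuel n (found + 1) guess'
        else nthPrimeLoop fuel n found guess'
      else guess

def nthPrime (n : Int) : Int := nthPrimeLoop (2 ^ 31 + 2) n 0 0

def pi (n : Int) : Int :=
  (PySem.List.pyRange 2 (n + 1) 1).foldl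
    (fun found term => if isPrime term then found + 1 else found) 0

def isPowerfulNumber (n : Int) : Bool :=
  let numberofprimes := pi n
  (PySem.List.pyRange 0 numberofprimes 1).all (fun i =>
    let primenumber := nthPrime i
    if PySem.Int.mod n primenumber == 0 then
      if !(PySem.Int.mod n (primenumber ^ 2) == 0) then false else true
    else true)

-- ===== PORT B =====

-- inner 'while m % d == 0: m //= d; cnt += 1' loop of Source B, with a fuel cap; fuel m.toNat suffices
def stripFactor : Nat → Int → Int → Int × Int
  | 0, m, _ => (m, 0)
  | fuel + 1, m, d =>
      if PySem.Int.mod m d == 0 then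
        let r := stripFactor fuel (PySem.Int.floordiv m d) d
        (r.1, r.2 + 1)
      else (m, 0)

-- outer 'while d * d <= m' loop of Source B, with a fuel cap; fuel n.toNat + 2 suffices
def powerfulLoop : Nat → Int → Int → Bool
  | 0, m, _ => m == 1
  | fuel + 1, m, d =>
      if d * d ≤ m then
        if PySem.Int.mod m d == 0 then
          let r := stripFactor m.toNat m d
          if r.2 < 2 then false else powerfulLoop fuel r.1 (d + 1)
        else powerfulLoop fuel m (d + 1)
      else m == 1

def isPowerfulNumber_alt (n : Int) : Bool :=
  if n < 2 then true else powerfulLoop (n.toNat + 2) n 2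

-- ===== PRECONDITION & SPEC =====
def Spec_isPowerfulNumber (n : Int) (out : Bool) : Prop := out = isPowerfulNumber_alt n
instance (n : Int) (out : Bool) : Decidable (Spec_isPowerfulNumber n out) := by unfold Spec_isPowerfulNumber; infer_instance

-- ===== CLAIM (what is proved, stated in full; the proofs are below) =====
def Claim_equal_isPowerfulNumber : Prop := ∀ (n : Int), Dom_isPowerfulNumber n → Spec_isPowerfulNumber n (isPowerfulNumber n)

-- ===== LEMMAS AND PROOFS =====

-- the common mathematical specification both programs decide: every prime factor has exponent ≥ 2
def Powerful (m : Nat) : Prop := ∀ p : Nat, p.Prime → p ∣ m → p * p ∣ m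

theorem mod_beq_zero_iff (a b : Int) : (PySem.Int.mod a b == 0) = true ↔ b ∣ a := by
  simp [PySem.Int.mod_eq_zero_iff_dvd]

theorem sqrt_add_two_le (k : Nat) (h : 3 ≤ k) : Nat.sqrt k + 2 ≤ k := by
  have hs := Nat.sqrt_le k
  by_cases h1 : Nat.sqrt k ≤ 1
  · omega
  · nlinarith [Nat.sqrt_le k]

theorem isPrime_eq (k : Nat) : isPrime (k : Int) = decide (Nat.Prime k) := by
  unfold isPrime
  by_cases hk2 : k < 2
  · rw [if_pos (by exact_mod_cast hk2)]
    interval_cases k <;> decide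
  push_neg at hk2
  rw [if_neg (by push_cast; omega)]
  by_cases hk2' : k = 2
  · subst hk2'; decide
  rw [if_neg (by simp; omega)]
  have hk3 : 3 ≤ k := by omega
  by_cases heven : 2 ∣ k
  · rw [if_pos (by rw [beq_iff_eq, PySem.Int.mod_eq_zero_iff_dvd]; exact_mod_cast heven)]
    have hnp : ¬ Nat.Prime k := by
      intro hp
      rcases (Nat.Prime.eq_one_or_self_of_dvd hp 2 heven) with h | h <;> omega
    simp [hnp]
  rw [if_neg (by rw [beq_iff_eq, PySem.Int.mod_eq_zero_iff_dvd]; exact_mod_cast heven)]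
  -- main case: k odd, k ≥ 3
  have hsqrt : Int.sqrt (k : Int) = (Nat.sqrt k : Int) := Int.sqrt_natCast k
  set s : Nat := Nat.sqrt k with hs
  set M : Int := pyRoundSqrt (k : Int) with hM
  have hMlb : (s : Int) ≤ M := by
    rw [hM]; unfold pyRoundSqrt; rw [hsqrt]; split <;> omega
  have hMub : M ≤ (s : Int) + 1 := by
    rw [hM]; unfold pyRoundSqrt; rw [hsqrt]; split <;> omega
  rw [Bool.eq_iff_iff, List.all_eq_true, decide_eq_true_eq]
  constructor
  · intro H
    by_contra hnp
    have hmp := Nat.minFac_prime (n := k) (by omega)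
    have hmd := Nat.minFac_dvd k
    have hmsq : k.minFac ^ 2 ≤ k := Nat.minFac_sq_le_self (by omega) hnp
    have hms : k.minFac ≤ s := Nat.le_sqrt.mpr (by nlinarith)
    have := H (k.minFac : Int) (by
      rw [PySem.List.mem_pyRange_one]
      have h2 := hmp.two_le
      constructor <;> [exact_mod_cast h2; omega])
    rw [Bool.not_eq_eq_eq_not, Bool.not_true, beq_eq_false_iff_ne] at this
    exact this (by rw [PySem.Int.mod_eq_zero_iff_dvd]; exact_mod_cast hmd)
  · intro hp term hterm
    rw [PySem.List.mem_pyRange_one] at hterm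
    rw [Bool.not_eq_eq_eq_not, Bool.not_true, beq_eq_false_iff_ne]
    rw [Ne, PySem.Int.mod_eq_zero_iff_dvd]
    intro hdvd
    have ht0 : (0:Int) ≤ term := by omega
    lift term to Nat using ht0 with t
    have htd : t ∣ k := by exact_mod_cast hdvd
    rcases (Nat.Prime.eq_one_or_self_of_dvd hp t htd) with h | h
    · omega
    · subst h
      have := sqrt_add_two_le t hk3
      omega

theorem nthPrimeLoop_exit (fuel : Nat) (n found guess : Int) (h : ¬ found ≤ n) :
    nthPrimeLoop fuel n found guess = guess := by
  cases fuel <;> simp [nthPrimeLoop, h]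

theorem count_prime_one : Nat.count Nat.Prime 1 = 0 := by decide

theorem nthPrimeLoop_eq (fuel : Nat) : ∀ (i : Nat) (g : Nat),
    Nat.count Nat.Prime (g + 1) ≤ i →
    Nat.nth Nat.Prime i ≤ g + fuel →
    nthPrimeLoop fuel (i : Int) ((Nat.count Nat.Prime (g + 1) : Nat) : Int) (g : Int)
      = ((Nat.nth Nat.Prime i : Nat) : Int) := by
  induction fuel with
  | zero =>
    intro i g hcount hfuel
    exfalso
    have h1 : Nat.count Nat.Prime (Nat.nth Nat.Prime i + 1)
        ≤ Nat.count Nat.Prime (g + 1) := Nat.count_monotone _ (by omega)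
    rw [Nat.count_succ] at h1
    rw [Nat.count_nth_of_infinite Nat.infinite_setOf_prime] at h1
    have := Nat.prime_nth_prime i
    simp [this] at h1
    omega
  | succ fuel ih =>
    intro i g hcount hfuel
    have hcond : ((Nat.count Nat.Prime (g + 1) : Nat) : Int) ≤ (i : Int) := by exact_mod_cast hcount
    rw [nthPrimeLoop, if_pos hcond]
    dsimp only
    have hg1 : ((g : Int) + 1) = ((g + 1 : Nat) : Int) := by push_cast; ring
    rw [hg1, isPrime_eq (g + 1)]
    by_cases hp : Nat.Prime (g + 1)
    · rw [decide_eq_true hp, if_pos rfl]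
      have hstep : Nat.count Nat.Prime (g + 2) = Nat.count Nat.Prime (g + 1) + 1 := by
        have := Nat.count_succ Nat.Prime (g + 1)
        simp [hp] at this
        omega
      by_cases hle : Nat.count Nat.Prime (g + 2) ≤ i
      · have h1 : ((Nat.count Nat.Prime (g + 1) : Nat) : Int) + 1
            = ((Nat.count Nat.Prime ((g + 1) + 1) : Nat) : Int) := by
          rw [show g + 1 + 1 = g + 2 from rfl, hstep]; push_cast; ring
        rw [h1]
        exact ih i (g + 1) (by omega) (by omega)
      · -- count (g+2) = i + 1 : the (i+1)-st prime is g+1 and the loop exits next round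
        have hceq : Nat.count Nat.Prime (g + 1) = i := by omega
        have hnth : Nat.nth Nat.Prime i = g + 1 := by
          rw [← hceq]; exact Nat.nth_count hp
        rw [nthPrimeLoop_exit _ _ _ _ (by push_cast; omega)]
        rw [hnth]
    · rw [decide_eq_false hp, if_neg (by simp)]
      have hstep : Nat.count Nat.Prime (g + 2) = Nat.count Nat.Prime (g + 1) := by
        have := Nat.count_succ Nat.Prime (g + 1)
        simp [hp] at this
        omega
      have h1 : ((Nat.count Nat.Prime (g + 1) : Nat) : Int)
          = ((Nat.count Nat.Prime ((g + 1) + 1) : Nat) : Int) := by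
        rw [show g + 1 + 1 = g + 2 from rfl, hstep]
      rw [h1]
      exact ih i (g + 1) (by omega) (by omega)

theorem nthPrime_correct (i : Nat) (h : Nat.nth Nat.Prime i ≤ 2 ^ 31 + 2) :
    nthPrime (i : Int) = ((Nat.nth Nat.Prime i : Nat) : Int) := by
  have := nthPrimeLoop_eq (2 ^ 31 + 2) i 0 (by rw [count_prime_one]; omega) (by omega)
  rw [count_prime_one] at this
  simpa [nthPrime] using this

theorem nth_lt_of_lt_count (j m : Nat) (h : j < Nat.count Nat.Prime m) :
    Nat.nth Nat.Prime j < m := by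
  by_contra hc
  push_neg at hc
  have h1 : Nat.count Nat.Prime m ≤ Nat.count Nat.Prime (Nat.nth Nat.Prime j) :=
    Nat.count_monotone _ hc
  rw [Nat.count_nth_of_infinite Nat.infinite_setOf_prime] at h1
  omega

theorem pi_aux : ∀ m : Nat,
    (PySem.List.pyRange 2 (m : Int) 1).foldl
      (fun found term => if isPrime term then found + 1 else found) 0
      = ((Nat.count Nat.Prime m : Nat) : Int) := by
  intro m
  induction m with
  | zero => rw [PySem.List.pyRange_one_eq_nil (by omega)]; simp
  | succ m ih =>
    by_cases hm : 2 ≤ m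
    · rw [show ((m + 1 : Nat) : Int) = (m : Int) + 1 by push_cast; ring,
        PySem.List.pyRange_one_succ_right (by exact_mod_cast hm),
        List.foldl_append, ih]
      simp only [List.foldl_cons, List.foldl_nil]
      rw [isPrime_eq m, Nat.count_succ]
      by_cases hp : Nat.Prime m <;> simp [hp] <;> push_cast <;> ring
    · interval_cases m <;> decide

theorem pi_eq (n : Int) : pi n = ((Nat.count Nat.Prime (n + 1).toNat : Nat) : Int) := by
  unfold pi
  by_cases hn : 0 ≤ n + 1
  · rw [show n + 1 = (((n + 1).toNat : Nat) : Int) from (Int.toNat_of_nonneg hn).symm]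
    exact pi_aux _
  · rw [PySem.List.pyRange_one_eq_nil (by omega), List.foldl_nil,
      show (n + 1).toNat = 0 by omega, Nat.count_zero]
    simp

theorem A_iff (n : Int) (h2 : 2 ≤ n) (hdom : n ≤ 2147483648) :
    (isPowerfulNumber n = true ↔ Powerful n.toNat) := by
  have hn0 : (0 : Int) ≤ n := by omega
  have hNn : ((n.toNat : Nat) : Int) = n := Int.toNat_of_nonneg hn0
  have htN : 2 ≤ n.toNat := by omega
  have htD : n.toNat ≤ 2147483648 := by omega
  unfold isPowerfulNumber
  rw [pi_eq, show (n + 1).toNat = n.toNat + 1 by omega]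
  set C := Nat.count Nat.Prime (n.toNat + 1) with hC
  rw [List.all_eq_true]
  have hnthle : ∀ j : Nat, j < C → Nat.nth Nat.Prime j ≤ 2147483648 := by
    intro j hj
    have := nth_lt_of_lt_count j (n.toNat + 1) (hC ▸ hj)
    omega
  constructor
  · intro H p hp hpd
    have hple : p ≤ n.toNat := Nat.le_of_dvd (by omega) hpd
    have hnth : Nat.nth Nat.Prime (Nat.count Nat.Prime p) = p := Nat.nth_count hp
    have hjC : Nat.count Nat.Prime p < C := by
      have h1 : Nat.count Nat.Prime (p + 1) = Nat.count Nat.Prime p + 1 := by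
        have := Nat.count_succ Nat.Prime p
        simp [hp] at this; omega
      have h2 : Nat.count Nat.Prime (p + 1) ≤ C := Nat.count_monotone _ (by omega)
      omega
    have hmem : ((Nat.count Nat.Prime p : Nat) : Int) ∈ PySem.List.pyRange 0 (C : Int) 1 := by
      rw [PySem.List.mem_pyRange_one]
      constructor
      · positivity
      · exact_mod_cast hjC
    have hbody := H _ hmem
    dsimp only at hbody
    rw [nthPrime_correct _ (by have := hnthle _ hjC; omega), hnth] at hbody
    rw [if_pos (by rw [mod_beq_zero_iff, ← hNn]; exact_mod_cast hpd)] at hbody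
    by_cases hsq : ((p : Int)) ^ 2 ∣ n
    · rw [show ((p : Int)) ^ 2 = (((p * p : Nat) : Nat) : Int) by push_cast; ring, ← hNn,
        Int.natCast_dvd_natCast] at hsq
      exact hsq
    · rw [if_pos (by rw [Bool.not_eq_eq_eq_not, Bool.not_true, beq_eq_false_iff_ne, Ne,
        PySem.Int.mod_eq_zero_iff_dvd]; exact hsq)] at hbody
      exact absurd hbody (by simp)
  · intro H x hx
    rw [PySem.List.mem_pyRange_one] at hx
    obtain ⟨hx0, hxC⟩ := hx
    lift x to Nat using hx0 with j
    have hjC : j < C := by exact_mod_cast hxC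
    rw [nthPrime_correct _ (by have := hnthle _ hjC; omega)]
    set p := Nat.nth Nat.Prime j with hp
    by_cases hdvd : ((p : Nat) : Int) ∣ n
    · rw [if_pos (by rw [mod_beq_zero_iff]; exact hdvd)]
      have hpd : p ∣ n.toNat := by rw [← hNn] at hdvd; exact_mod_cast hdvd
      have hsq : p * p ∣ n.toNat := H p (Nat.prime_nth_prime j) hpd
      have hsqI : ((p : Nat) : Int) ^ 2 ∣ n := by
        rw [show ((p : Nat) : Int) ^ 2 = (((p * p : Nat) : Nat) : Int) by push_cast; ring, ← hNn]
        exact_mod_cast hsq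
      rw [if_neg (by rw [Bool.not_eq_eq_eq_not, Bool.not_true, beq_eq_false_iff_ne, Ne,
        PySem.Int.mod_eq_zero_iff_dvd]; exact not_not_intro hsqI)]
    · rw [if_neg (by rw [mod_beq_zero_iff]; exact hdvd)]

theorem dvd_iff_toNat (q : Nat) (m : Int) (hm : 0 ≤ m) : (q : Int) ∣ m ↔ q ∣ m.toNat := by
  nth_rewrite 1 [← Int.toNat_of_nonneg hm]
  exact Int.natCast_dvd_natCast

theorem toNat_mul_pow (d m' : Int) (k : Nat) (hd : 0 ≤ d) (hm' : 0 ≤ m') :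
    (d ^ k * m').toNat = d.toNat ^ k * m'.toNat := by
  have h : ((d.toNat ^ k * m'.toNat : Nat) : Int) = d ^ k * m' := by
    push_cast [Int.toNat_of_nonneg hd, Int.toNat_of_nonneg hm']; ring
  rw [← h, Int.toNat_natCast]

theorem strip_spec : ∀ (fuel : Nat) (m d : Int), 1 ≤ m → 2 ≤ d → m.toNat ≤ fuel →
    ∃ (k : Nat) (m' : Int), stripFactor fuel m d = (m', (k : Int)) ∧
      m = d ^ k * m' ∧ ¬ d ∣ m' ∧ 1 ≤ m' ∧ (d ∣ m → 1 ≤ k) := by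
  intro fuel
  induction fuel with
  | zero => intro m d hm hd hf; exfalso; omega
  | succ fuel ih =>
    intro m d hm hd hf
    by_cases hdvd : d ∣ m
    · obtain ⟨q, hq⟩ := hdvd
      have hq1 : 1 ≤ q := by nlinarith
      have hlt : q < m := by nlinarith
      have hflo : PySem.Int.floordiv m d = q := by
        rw [PySem.Int.floordiv_eq_ediv_of_pos (by omega), hq,
          Int.mul_ediv_cancel_left _ (by omega)]
      obtain ⟨k, m', heq, hfact, hnd, hm1, -⟩ := ih q d hq1 hd (by omega)
      refine ⟨k + 1, m', ?_, ?_, hnd, hm1, fun _ => by omega⟩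
      · rw [stripFactor, if_pos ((mod_beq_zero_iff _ _).mpr ⟨q, hq⟩)]
        dsimp only
        rw [hflo, heq]
        simp
      · rw [hq, hfact, pow_succ]; ring
    · refine ⟨0, m, ?_, by rw [pow_zero, one_mul], hdvd, hm, fun h => absurd h hdvd⟩
      rw [stripFactor, if_neg (by rw [mod_beq_zero_iff _ _]; exact hdvd)]
      norm_num

theorem powerful_one : Powerful 1 := by
  intro p hp hpd
  exact absurd (Nat.eq_one_of_dvd_one hpd) hp.ne_one

theorem minFac_ge_of_small (m : Int) (d : Int) (hm : 2 ≤ m) (hd : 2 ≤ d)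
    (hsmall : ∀ q : Nat, q.Prime → (q : Int) < d → ¬ (q : Int) ∣ m) :
    d ≤ (m.toNat.minFac : Int) := by
  have hne : m.toNat ≠ 1 := by omega
  have hp := Nat.minFac_prime hne
  have hdv : (m.toNat.minFac : Int) ∣ m := by
    rw [dvd_iff_toNat _ _ (by omega)]
    exact Nat.minFac_dvd _
  by_contra hc
  exact hsmall _ hp (by omega) hdv

theorem powerful_exit (m d : Int) (hm : 1 ≤ m) (hd : 2 ≤ d) (hlt : m < d * d)
    (hsmall : ∀ q : Nat, q.Prime → (q : Int) < d → ¬ (q : Int) ∣ m) :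
    ((m == 1) = true ↔ Powerful m.toNat) := by
  by_cases h1 : m = 1
  · subst h1
    simp [powerful_one]
  · have hm2 : 2 ≤ m := by omega
    have hge := minFac_ge_of_small m d hm2 hd hsmall
    have hne : m.toNat ≠ 1 := by omega
    have hp := Nat.minFac_prime hne
    have hnpow : ¬ Powerful m.toNat := by
      intro H
      have hsq := H _ hp (Nat.minFac_dvd _)
      have hle : m.toNat.minFac * m.toNat.minFac ≤ m.toNat := Nat.le_of_dvd (by omega) hsq
      have : ((m.toNat.minFac * m.toNat.minFac : Nat) : Int) ≤ m := by
        rw [← Int.toNat_of_nonneg (by omega : (0:Int) ≤ m)]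
        exact_mod_cast hle
      push_cast at this
      nlinarith
    simp [h1, hnpow]

theorem powerful_mul_pow (p k M : Nat) (hp : p.Prime) (hk : 2 ≤ k) (hnd : ¬ p ∣ M) :
    (Powerful (p ^ k * M) ↔ Powerful M) := by
  have hcopqp : ∀ q : Nat, q.Prime → q ∣ M → q.Coprime p := by
    intro q hq hqM
    rw [Nat.Prime.coprime_iff_not_dvd hq]
    intro hqp
    have : q = p := (Nat.prime_dvd_prime_iff_eq hq hp).mp hqp
    exact hnd (this ▸ hqM)
  constructor
  · intro H q hq hqM
    have hsq := H q hq (hqM.mul_left _)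
    have hcop : (q * q).Coprime (p ^ k) :=
      Nat.Coprime.pow_right _ (Nat.Coprime.mul_left (hcopqp q hq hqM) (hcopqp q hq hqM))
    exact hcop.dvd_of_dvd_mul_left hsq
  · intro H q hq hqd
    by_cases hqp : q = p
    · subst hqp
      exact dvd_mul_of_dvd_left (by rw [← pow_two]; exact pow_dvd_pow q hk) M
    · have hqM : q ∣ M := by
        rcases (Nat.Prime.dvd_mul hq).mp hqd with h | h
        · exact absurd ((Nat.prime_dvd_prime_iff_eq hq hp).mp (hq.dvd_of_dvd_pow h)) hqp
        · exact h
      exact (H q hq hqM).mul_left _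

theorem powerfulLoop_spec : ∀ (fuel : Nat) (m d : Int), 1 ≤ m → 2 ≤ d →
    (∀ q : Nat, q.Prime → (q : Int) < d → ¬ (q : Int) ∣ m) →
    m.toNat + 3 ≤ fuel + d.toNat →
    (powerfulLoop fuel m d = true ↔ Powerful m.toNat) := by
  intro fuel
  induction fuel with
  | zero =>
    intro m d hm hd hsmall hf
    have hdm : m < d := by omega
    have hlt : m < d * d := by nlinarith
    rw [powerfulLoop]
    exact powerful_exit m d hm hd hlt hsmall
  | succ fuel ih =>
    intro m d hm hd hsmall hf
    rw [powerfulLoop]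
    by_cases hcond : d * d ≤ m
    · rw [if_pos hcond]
      by_cases hdvd : d ∣ m
      · rw [if_pos ((mod_beq_zero_iff _ _).mpr hdvd)]
        dsimp only
        obtain ⟨k, m', heq, hfact, hnd, hm1, hk1⟩ := strip_spec m.toNat m d hm hd le_rfl
        rw [heq]
        have hdP : Nat.Prime d.toNat := by
          have hqp := Nat.minFac_prime (by omega : d.toNat ≠ 1)
          have hqd : ((d.toNat.minFac : Nat) : Int) ∣ d := by
            rw [dvd_iff_toNat _ _ (by omega)]; exact Nat.minFac_dvd _
          have hqm : ((d.toNat.minFac : Nat) : Int) ∣ m := hqd.trans hdvd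
          have hqge : d ≤ (d.toNat.minFac : Int) := by
            by_contra hc; exact hsmall _ hqp (by omega) hqm
          have hqle : d.toNat.minFac ≤ d.toNat := Nat.le_of_dvd (by omega) (Nat.minFac_dvd _)
          have heqq : d.toNat.minFac = d.toNat := by omega
          rw [← heqq]; exact hqp
        have hfactN : m.toNat = d.toNat ^ k * m'.toNat := by
          rw [hfact, toNat_mul_pow d m' k (by omega) (by omega)]
        have hndN : ¬ d.toNat ∣ m'.toNat := by
          intro hc
          apply hnd
          rw [← Int.toNat_of_nonneg (by omega : (0:Int) ≤ d), dvd_iff_toNat _ _ (by omega)]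
          exact hc
        by_cases hk2 : ((k : Nat) : Int) < 2
        · rw [if_pos hk2]
          have hk : k = 1 := by have := hk1 hdvd; omega
          subst hk
          simp only [pow_one] at hfactN
          constructor
          · intro hfalse; exact absurd hfalse (by simp)
          · intro H
            exfalso
            have hdd := H d.toNat hdP (by rw [hfactN]; exact Dvd.intro _ rfl)
            rw [hfactN] at hdd
            exact hndN ((mul_dvd_mul_iff_left (by omega : d.toNat ≠ 0)).mp hdd)
        · rw [if_neg hk2]
          have hk2' : 2 ≤ k := by omega
          have hdk : d ≤ d ^ k := le_self_pow₀ (by omega) (by omega)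
          have hm'lt : m' < m := by nlinarith
          have hsmall' : ∀ q : Nat, q.Prime → (q : Int) < d + 1 → ¬ (q : Int) ∣ m' := by
            intro q hq hlt' hdv
            by_cases hqd : (q : Int) < d
            · exact hsmall q hq hqd (by rw [hfact]; exact hdv.mul_left _)
            · have : (q : Int) = d := by omega
              exact hnd (this ▸ hdv)
          rw [ih m' (d + 1) hm1 (by omega) hsmall' (by omega)]
          rw [hfactN]
          exact (powerful_mul_pow d.toNat k m'.toNat hdP hk2' hndN).symm
      · rw [if_neg (by rw [mod_beq_zero_iff _ _]; exact hdvd)]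
        have hsmall' : ∀ q : Nat, q.Prime → (q : Int) < d + 1 → ¬ (q : Int) ∣ m := by
          intro q hq hlt' hdv
          by_cases hqd : (q : Int) < d
          · exact hsmall q hq hqd hdv
          · have : (q : Int) = d := by omega
            exact hdvd (this ▸ hdv)
        exact ih m (d + 1) hm (by omega) hsmall' (by omega)
    · rw [if_neg hcond]
      exact powerful_exit m d hm hd (not_le.mp hcond) hsmall

theorem B_iff (n : Int) (h2 : 2 ≤ n) :
    (isPowerfulNumber_alt n = true ↔ Powerful n.toNat) := by
  unfold isPowerfulNumber_alt
  rw [if_neg (by omega)]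
  exact powerfulLoop_spec (n.toNat + 2) n 2 (by omega) (by omega)
    (fun q hq hlt _ => by have := hq.two_le; omega) (by omega)

-- ===== VERDICT (by name: the statement is the Claim_ definition above) =====
theorem isPowerfulNumber_spec : Claim_equal_isPowerfulNumber := by
  intro n hdom
  unfold Spec_isPowerfulNumber
  have hdom' : -2147483648 ≤ n ∧ n ≤ 2147483648 := by
    simpa [Dom_isPowerfulNumber, pvDomInt] using hdom
  by_cases h2 : 2 ≤ n
  · rw [Bool.eq_iff_iff, A_iff n h2 hdom'.2, B_iff n h2]
  · -- n ≤ 1 : A's prime count is 0 so its loop is empty; B returns True directly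
    push_neg at h2
    have hA : isPowerfulNumber n = true := by
      unfold isPowerfulNumber
      rw [pi_eq]
      have hle : (n + 1).toNat ≤ 2 := by omega
      have hc : Nat.count Nat.Prime (n + 1).toNat = 0 := by
        interval_cases h : (n + 1).toNat <;> decide
      rw [hc]
      simp [PySem.List.pyRange_one_eq_nil]
    have hB : isPowerfulNumber_alt n = true := by
      unfold isPowerfulNumber_alt
      rw [if_pos (by omega)]
    rw [hA, hB]
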